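-- pv_equiv track=rewrite | github.com/MrBrantCode/unitest_baseline | mut_generate/mist_train_cf/cf_76445/solution.py | predict_movie_genre
-- ===== SOURCE A (Python) =====
-- def predict_movie_genre(statement):
--     # Assuming a pre-trained machine learning model is used for prediction
--     # This is a simplified example using a dictionary for demonstration purposes
--     genre_indicators = {
--         "thrilling": "Thriller",
--         "romantic": "Romance",
--         "action": "Action"
--     }
--
--     # Split the statement into words
--     words = statement.split()
--
--     # Initialize the predicted genre
--     predicted_genre = None
--
--     # Iterate over each word in the statement
--     for word in words:
--         # Remove punctuation from the word
--         word = word.strip('.,!?;:"\'')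
--
--         # Check if the word is a genre indicator
--         if word in genre_indicators:
--             # Update the predicted genre
--             predicted_genre = genre_indicators[word]
--
--     # Return the predicted genre
--     return predicted_genre
-- ===== SOURCE B (Python) =====
-- def predict_movie_genre(statement):
--     genre_indicators = {
--         "thrilling": "Thriller",
--         "romantic": "Romance",
--         "action": "Action"
--     }
--     # Per-key search: for each indicator key, locate the position of its last
--     # occurrence among the stripped words; the answer is the genre of the key
--     # whose last occurrence is furthest right (None if no key occurs).
--     words = [w.strip('.,!?;:"\'') for w in statement.split()]
--     best_pos = -1
--     result = None
--     for key, genre in genre_indicators.items():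
--         if key in words:
--             pos = len(words) - 1 - words[::-1].index(key)
--             if pos > best_pos:
--                 best_pos = pos
--                 result = genre
--     return result
-- ===== Notes on version B (the rewrite author's own statement) =====
-- stated objective: alternative
-- what changed: Instead of scanning the words and keeping the last match, B strips all words once, then iterates over the three indicator keys, computes each key's last occurrence position via a reversed index lookup, and returns the genre of the key with the maximal position.
import Mathlib
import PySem

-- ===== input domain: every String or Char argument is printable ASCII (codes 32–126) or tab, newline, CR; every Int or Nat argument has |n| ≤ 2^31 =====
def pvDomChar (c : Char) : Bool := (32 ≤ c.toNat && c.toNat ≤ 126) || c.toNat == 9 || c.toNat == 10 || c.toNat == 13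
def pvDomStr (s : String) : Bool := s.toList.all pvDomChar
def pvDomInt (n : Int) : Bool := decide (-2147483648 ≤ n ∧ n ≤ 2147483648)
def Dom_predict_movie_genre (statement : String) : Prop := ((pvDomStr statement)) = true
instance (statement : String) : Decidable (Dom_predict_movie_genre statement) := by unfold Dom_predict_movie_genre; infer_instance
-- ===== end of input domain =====

-- B strips all words once, then searches per indicator key for its last occurrence position and returns the genre with the maximal position (A scans words keeping the last match); return values only.


-- ===== PORT A =====
def pvGenres : PySem.Dict String String :=
  (((PySem.Dict.empty).insert "thrilling" "Thriller").insert "romantic" "Romance").insert "action" "Action"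

def predict_movie_genre (statement : String) : Option String :=
  let words := PySem.Str.split₀ statement
  words.foldl (fun predicted_genre w =>
    let word := PySem.Str.stripChars w ".,!?;:\"'"
    if pvGenres.contains word then pvGenres.get? word else predicted_genre) none

-- ===== PORT B =====
def predict_movie_genre_alt (statement : String) : Option String :=
  let words := (PySem.Str.split₀ statement).map (fun w => PySem.Str.stripChars w ".,!?;:\"'")
  (pvGenres.items.foldl (fun st kg =>
      match PySem.List.index? words.reverse kg.1 with
      | some j =>
        let pos : Int := (words.length : Int) - 1 - (j : Int)
        if pos > st.1 then (pos, some kg.2) else st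
      | none => st) ((-1 : Int), (none : Option String))).2

-- ===== PRECONDITION & SPEC =====
def Spec_predict_movie_genre (statement : String) (out : Option String) : Prop := out = predict_movie_genre_alt statement
instance (statement : String) (out : Option String) : Decidable (Spec_predict_movie_genre statement out) := by unfold Spec_predict_movie_genre; infer_instance

-- ===== CLAIM (what is proved, stated in full; the proofs are below) =====
def Claim_equal_predict_movie_genre : Prop := ∀ (statement : String), Dom_predict_movie_genre statement → Spec_predict_movie_genre statement (predict_movie_genre statement)

-- ===== LEMMAS AND PROOFS =====

-- first element (from the left) whose dict lookup succeeds
def pvFirst : List String → Option String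
  | [] => none
  | w :: t =>
    match pvGenres.get? w with
    | some g => some g
    | none => pvFirst t

-- B's loop body, with the word count n passed explicitly
def pvStep (n : Nat) (l : List String) (st : Int × Option String) (kg : String × String) : Int × Option String :=
  match PySem.List.index? l kg.1 with
  | some j =>
    let pos : Int := (n : Int) - 1 - (j : Int)
    if pos > st.1 then (pos, some kg.2) else st
  | none => st

lemma pvGenres_eq : pvGenres = PySem.Dict.mk [("thrilling", "Thriller"), ("romantic", "Romance"), ("action", "Action")] := rfl

lemma pvGenres_get? (w : String) :
    pvGenres.get? w = if w = "thrilling" then some "Thriller"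
      else if w = "romantic" then some "Romance"
      else if w = "action" then some "Action" else none := by
  rcases eq_or_ne w "thrilling" with h1 | h1
  · subst h1; decide
  rcases eq_or_ne w "romantic" with h2 | h2
  · subst h2; decide
  rcases eq_or_ne w "action" with h3 | h3
  · subst h3; decide
  rw [if_neg h1, if_neg h2, if_neg h3, pvGenres_eq]
  simp only [PySem.Dict.get?_mk_cons, beq_iff_eq]
  rw [if_neg (fun h => h1 h.symm), if_neg (fun h => h2 h.symm), if_neg (fun h => h3 h.symm)]
  rfl

-- ===== A-side characterisation =====

-- A's keep-last forward scan over raw words = pvFirst over the stripped reversed words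
lemma pvFoldl_eq_pvFirst (ws : List String) (acc : Option String) :
    ws.foldl (fun predicted_genre w =>
      let word := PySem.Str.stripChars w ".,!?;:\"'"
      if pvGenres.contains word then pvGenres.get? word else predicted_genre) acc
    = match pvFirst ((ws.map (fun w => PySem.Str.stripChars w ".,!?;:\"'")).reverse) with
      | some g => some g
      | none => acc := by
  induction ws generalizing acc with
  | nil => simp [pvFirst]
  | cons w ws ih =>
    simp only [List.foldl_cons, List.map_cons, List.reverse_cons, ih]
    have haux : ∀ (l : List String) (x : String), pvFirst (l ++ [x]) =
        match pvFirst l with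
        | some g => some g
        | none => pvFirst [x] := by
      intro l x
      induction l with
      | nil => simp [pvFirst]
      | cons y t iht =>
        simp only [List.cons_append, pvFirst]
        cases pvGenres.get? y with
        | some g => rfl
        | none => exact iht
    rw [haux]
    have hc : pvGenres.contains (PySem.Str.stripChars w ".,!?;:\"'") =
        (pvGenres.get? (PySem.Str.stripChars w ".,!?;:\"'")).isSome := by
      simp [PySem.Dict.contains_eq_isSome_get?]
    cases hg : pvGenres.get? (PySem.Str.stripChars w ".,!?;:\"'") with
    | some g =>
      cases pvFirst ((ws.map (fun w => PySem.Str.stripChars w ".,!?;:\"'")).reverse) <;>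
        simp [pvFirst, hg, hc]
    | none =>
      cases pvFirst ((ws.map (fun w => PySem.Str.stripChars w ".,!?;:\"'")).reverse) <;>
        simp [pvFirst, hg, hc]

-- ===== B-side step lemmas =====

lemma pvStep_keep (n : Nat) (l : List String) (st : Int × Option String) (kg : String × String)
    (h : (n : Int) - 1 ≤ st.1) : pvStep n l st kg = st := by
  unfold pvStep
  cases PySem.List.index? l kg.1 with
  | none => rfl
  | some j =>
    simp only
    rw [if_neg]
    omega

lemma pvStep_shift (n : Nat) (t : List String) (w : String) (kg : String × String)
    (hne : w ≠ kg.1) (st : Int × Option String) :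
    pvStep (n + 1) (w :: t) st kg = pvStep n t st kg := by
  unfold pvStep
  rw [PySem.List.index?_cons_of_ne t hne]
  cases PySem.List.index? t kg.1 with
  | none => rfl
  | some j =>
    simp only [Option.map_some]
    have h : ((n : Int) + 1) - 1 - (((j : Int)) + 1) = (n : Int) - 1 - (j : Int) := by ring
    push_cast
    rw [h]

lemma pvStep_fst_lt (n : Nat) (t : List String) (w : String) (kg : String × String)
    (hne : w ≠ kg.1) (st : Int × Option String) (h : st.1 < (n : Int)) :
    (pvStep (n + 1) (w :: t) st kg).1 < (n : Int) := by
  unfold pvStep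
  rw [PySem.List.index?_cons_of_ne t hne]
  cases PySem.List.index? t kg.1 with
  | none => exact h
  | some j =>
    simp only [Option.map_some]
    split_ifs with hp
    · simp only
      push_cast
      omega
    · exact h

-- ===== main equivalence of the two cores =====

lemma pvBcore_eq_pvFirst (l : List String) :
    (pvGenres.items.foldl (pvStep l.length l) ((-1 : Int), (none : Option String))).2 = pvFirst l := by
  have hitems : pvGenres.items =
      [("thrilling", "Thriller"), ("romantic", "Romance"), ("action", "Action")] := rfl
  induction l with
  | nil =>
    rw [hitems]
    simp [pvStep, PySem.List.index?_eq_idxOf?, List.idxOf?, pvFirst, List.foldl]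
  | cons w t ih =>
    rw [hitems] at ih ⊢
    simp only [List.foldl_cons, List.foldl_nil, List.length_cons] at ih ⊢
    cases hg : pvGenres.get? w with
    | none =>
      -- w is none of the keys: every index shifts by one, the loop state is unchanged
      rw [pvGenres_get?] at hg
      split_ifs at hg with h1 h2 h3
      rw [pvStep_shift t.length t w ("thrilling", "Thriller") h1,
          pvStep_shift t.length t w ("romantic", "Romance") h2,
          pvStep_shift t.length t w ("action", "Action") h3, ih]
      simp [pvFirst, pvGenres_get?, h1, h2, h3]
    | some g =>
      -- w is one of the keys: its index is 0, so its position t.length beats every other key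
      have hfirst : pvFirst (w :: t) = some g := by simp [pvFirst, hg]
      rw [pvGenres_get?] at hg
      rw [hfirst]
      split_ifs at hg with h1 h2 h3
      · -- w = "thrilling"
        subst h1
        have hst1 : pvStep (t.length + 1) ("thrilling" :: t) ((-1 : Int), none)
            ("thrilling", "Thriller") = ((t.length : Int), some "Thriller") := by
          unfold pvStep
          rw [PySem.List.index?_cons_self]
          simp only
          rw [if_pos (by push_cast <;> omega)]
          norm_num
        rw [hst1,
            pvStep_keep (t.length + 1) _ ((t.length : Int), some "Thriller")
              ("romantic", "Romance") (by push_cast <;> omega),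
            pvStep_keep (t.length + 1) _ ((t.length : Int), some "Thriller")
              ("action", "Action") (by push_cast <;> omega)]
        exact hg
      · -- w = "romantic"
        subst h2
        have hs1 := pvStep_fst_lt t.length t "romantic" ("thrilling", "Thriller")
          (by decide) ((-1 : Int), none) (by push_cast <;> omega)
        set st1 := pvStep (t.length + 1) ("romantic" :: t) ((-1 : Int), none)
          ("thrilling", "Thriller") with hst1def
        have hst2 : pvStep (t.length + 1) ("romantic" :: t) st1 ("romantic", "Romance")
            = ((t.length : Int), some "Romance") := by
          unfold pvStep
          rw [PySem.List.index?_cons_self]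
          simp only
          rw [if_pos (by push_cast <;> omega)]
          norm_num
        rw [hst2,
            pvStep_keep (t.length + 1) _ ((t.length : Int), some "Romance")
              ("action", "Action") (by push_cast <;> omega)]
        exact hg
      · -- w = "action"
        subst h3
        have hs1 := pvStep_fst_lt t.length t "action" ("thrilling", "Thriller")
          (by decide) ((-1 : Int), none) (by push_cast <;> omega)
        set st1 := pvStep (t.length + 1) ("action" :: t) ((-1 : Int), none)
          ("thrilling", "Thriller") with hst1def
        have hs2 := pvStep_fst_lt t.length t "action" ("romantic", "Romance")
          (by decide) st1 hs1
        set st2 := pvStep (t.length + 1) ("action" :: t) st1 ("romantic", "Romance") with hst2def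
        have hst3 : pvStep (t.length + 1) ("action" :: t) st2 ("action", "Action")
            = ((t.length : Int), some "Action") := by
          unfold pvStep
          rw [PySem.List.index?_cons_self]
          simp only
          rw [if_pos (by push_cast <;> omega)]
          norm_num
        rw [hst3]
        exact hg

-- ===== VERDICT (by name: the statement is the Claim_ definition above) =====
theorem predict_movie_genre_spec : Claim_equal_predict_movie_genre := by
  intro statement _
  unfold Spec_predict_movie_genre predict_movie_genre predict_movie_genre_alt
  simp only [pvFoldl_eq_pvFirst]
  have hB : ∀ (words : List String),
      (pvGenres.items.foldl (fun st kg =>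
        match PySem.List.index? words.reverse kg.1 with
        | some j =>
          let pos : Int := (words.length : Int) - 1 - (j : Int)
          if pos > st.1 then (pos, some kg.2) else st
        | none => st) ((-1 : Int), (none : Option String))).2 = pvFirst words.reverse := by
    intro words
    have := pvBcore_eq_pvFirst words.reverse
    simp only [List.length_reverse] at this
    exact this
  rw [hB]
  cases pvFirst ((PySem.Str.split₀ statement).map (fun w => PySem.Str.stripChars w ".,!?;:\"'")).reverse <;> rfl
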